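-- pv_equiv track=rewrite | github.com/LucasZzarate/UTN-TUPaD-P1 | 05_Funciones/Zarate_Lucas_TP-06.py | contar_digitow
-- ===== SOURCE A (Python) =====
-- def contar_digitow(numero, digito):
--     numero = str(numero)
--     digito = str(digito)
--
--     if len(numero) == 1:
--         if numero == digito:
--             return 1
--         else:
--             return 0
--     else:
--         fn = contar_digitow(numero[0:-1], digito) # se que tengo que sumar lo que retorna y que tengo que recuperar el numero
--         return fn
-- ===== SOURCE B (Python) =====
-- def contar_digitow(numero, digito):
--     s = str(numero)
--     d = str(digito)
--     return 1 if s[0] == d else 0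
-- ===== Notes on version B (the rewrite author's own statement) =====
-- stated objective: simpler
-- what changed: A's recursion strips the last character until one remains and only ever returns that base case's comparison; B replaces the whole length-walking recursion with a single closed-form comparison of the first character of str(numero) against str(digito).
import Mathlib
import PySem

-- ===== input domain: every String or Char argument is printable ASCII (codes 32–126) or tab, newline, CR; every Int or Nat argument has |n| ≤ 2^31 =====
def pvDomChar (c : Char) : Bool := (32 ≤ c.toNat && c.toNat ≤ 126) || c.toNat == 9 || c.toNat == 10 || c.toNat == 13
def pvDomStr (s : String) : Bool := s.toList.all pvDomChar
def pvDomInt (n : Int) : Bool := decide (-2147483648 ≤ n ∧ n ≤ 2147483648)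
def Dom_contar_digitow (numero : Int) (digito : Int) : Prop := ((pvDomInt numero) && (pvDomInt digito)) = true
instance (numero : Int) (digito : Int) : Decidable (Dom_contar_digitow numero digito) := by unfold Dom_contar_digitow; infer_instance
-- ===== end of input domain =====

-- B (simpler): A's last-char-stripping recursion only ever returns its base case, so B is the closed-form comparison of str(numero)'s first character with str(digito).


-- ===== PORT A =====
-- recursive helper: the body of A after 'numero = str(numero); digito = str(digito)'
def contarGoA (s : List Char) (d : List Char) : Int :=
  match s with
  | [] => 0  -- unreachable from str(int) (totality guard; Python would recurse forever on "")
  | [c] => if [c] = d then 1 else 0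
  | c1 :: c2 :: rest => contarGoA ((c1 :: c2 :: rest).dropLast) d
termination_by s.length
decreasing_by simp

def contar_digitow (numero : Int) (digito : Int) : Int :=
  contarGoA (PySem.Int.toStr numero).toList (PySem.Int.toStr digito).toList

-- ===== PORT B =====
def contar_digitow_alt (numero : Int) (digito : Int) : Int :=
  let s := (PySem.Int.toStr numero).toList
  let d := (PySem.Int.toStr digito).toList
  match PySem.List.pyGet? s 0 with  -- s[0]; str(int) is never empty
  | some c => if [c] = d then 1 else 0
  | none => 0

-- ===== PRECONDITION & SPEC =====
def Spec_contar_digitow (numero : Int) (digito : Int) (out : Int) : Prop := out = contar_digitow_alt numero digito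
instance (numero : Int) (digito : Int) (out : Int) : Decidable (Spec_contar_digitow numero digito out) := by unfold Spec_contar_digitow; infer_instance

-- ===== CLAIM (what is proved, stated in full; the proofs are below) =====
def Claim_equal_contar_digitow : Prop := ∀ (numero : Int) (digito : Int), Dom_contar_digitow numero digito → Spec_contar_digitow numero digito (contar_digitow numero digito)

-- ===== LEMMAS AND PROOFS =====
-- A's recursion only ever returns its base case, whose value depends on the FIRST character only.

-- ===== VERDICT (by name: the statement is the Claim_ definition above) =====
theorem contarGoA_cons (rest : List Char) : ∀ (c : Char) (d : List Char),
    contarGoA (c :: rest) d = if [c] = d then 1 else 0 := by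
  induction rest using List.reverseRecOn with
  | nil => intro c d; simp [contarGoA]
  | append_singleton ys y ih =>
    intro c d
    cases ys with
    | nil => simp [contarGoA]
    | cons z zs =>
      simp only [List.cons_append]
      rw [contarGoA.eq_def]
      change contarGoA ((c :: z :: (zs ++ [y])).dropLast) d = if [c] = d then 1 else 0
      have h : (c :: z :: (zs ++ [y])).dropLast = c :: z :: zs := by
        simpa using (List.dropLast_concat (l₁ := c :: z :: zs) (b := y))
      rw [h]
      exact ih c d

theorem contar_digitow_spec : Claim_equal_contar_digitow := by
  intro numero digito _
  unfold Spec_contar_digitow contar_digitow contar_digitow_alt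
  cases h : (PySem.Int.toStr numero).toList with
  | nil => simp [contarGoA, PySem.List.pyGet?]
  | cons c rest => simp [contarGoA_cons]
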